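-- pv_equiv track=rewrite | github.com/eliottcassidy2000/math | 04-computation/omega3_real_roots_large.py | build_conflict_graph_3
-- ===== SOURCE A (Python) =====
-- def build_conflict_graph_3(cycles_3):
--     """Build conflict graph: two 3-cycles conflict iff they share a vertex."""
--     m = len(cycles_3)
--     adj = [[0]*m for _ in range(m)]
--     for i in range(m):
--         for j in range(i+1, m):
--             if set(cycles_3[i]) & set(cycles_3[j]):
--                 adj[i][j] = adj[j][i] = 1
--     return adj
-- ===== SOURCE B (Python) =====
-- def build_conflict_graph_3(cycles_3):
--     """Inverted index: map each vertex to the cycles containing it, then mark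
--     every pair of cycles sharing a bucket, instead of testing all pairs."""
--     m = len(cycles_3)
--     incident = {}
--     for idx, cyc in enumerate(cycles_3):
--         for v in dict.fromkeys(cyc):
--             incident.setdefault(v, []).append(idx)
--     adj = [[0] * m for _ in range(m)]
--     for bucket in incident.values():
--         for a in range(len(bucket)):
--             for b in range(a + 1, len(bucket)):
--                 i, j = bucket[a], bucket[b]
--                 adj[i][j] = adj[j][i] = 1
--     return adj
-- ===== Notes on version B (the rewrite author's own statement) =====
-- stated objective: faster
-- what changed: Replaces the all-pairs set-intersection scan with an inverted index: one pass builds a vertex-to-cycle-indices map, then edges are emitted only within each vertex's bucket, so only pairs that actually share a vertex are touched.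
import Mathlib
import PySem

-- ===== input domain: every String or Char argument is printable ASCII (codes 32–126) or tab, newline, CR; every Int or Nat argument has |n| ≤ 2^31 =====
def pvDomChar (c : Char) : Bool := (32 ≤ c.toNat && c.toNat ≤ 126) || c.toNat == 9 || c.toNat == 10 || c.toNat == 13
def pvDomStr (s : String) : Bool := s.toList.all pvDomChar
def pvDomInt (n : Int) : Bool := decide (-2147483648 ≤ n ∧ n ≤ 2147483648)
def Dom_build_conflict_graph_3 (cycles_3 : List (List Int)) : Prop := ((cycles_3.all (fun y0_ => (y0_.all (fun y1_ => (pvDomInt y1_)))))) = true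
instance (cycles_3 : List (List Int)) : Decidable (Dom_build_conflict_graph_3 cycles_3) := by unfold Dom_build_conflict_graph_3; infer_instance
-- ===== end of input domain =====

-- B replaces A's all-pairs set-intersection scan by an inverted index (vertex → cycles containing it);
-- equivalence of the RETURN value is proved (neither version mutates its argument).

-- 'adj[i][j] = 1' : fetch row i, set column j (indices are Python ints; always in range here)
def pvSet1 (M : List (List Int)) (i j : Int) : List (List Int) :=
  PySem.List.pySetD M i (PySem.List.pySetD (PySem.List.pyGetD M i []) j 1)

-- 'adj[i][j] = adj[j][i] = 1' : left-to-right, two assignments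
def pvSet2 (M : List (List Int)) (i j : Int) : List (List Int) :=
  pvSet1 (pvSet1 M i j) j i

-- ===== PORT A =====
def build_conflict_graph_3 (cycles_3 : List (List Int)) : List (List Int) :=
  let m : Int := PySem.List.len cycles_3
  let adj : List (List Int) := (PySem.List.pyRange 0 m 1).map (fun _ => PySem.List.pyRepeat [0] m)
  (PySem.List.pyRange 0 m 1).foldl (fun adj i =>
    (PySem.List.pyRange (i + 1) m 1).foldl (fun adj j =>
      if PySem.Set.inter (PySem.Set.ofList (PySem.List.pyGetD cycles_3 i []))
           (PySem.Set.ofList (PySem.List.pyGetD cycles_3 j [])) ≠ [] then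
        pvSet2 adj i j
      else adj) adj) adj

-- ===== PORT B =====
-- 'incident.setdefault(v, []).append(idx)' is Dict.modify v [] (· ++ [idx]) (insert at end if absent, extend in place if present)
def build_conflict_graph_3_alt (cycles_3 : List (List Int)) : List (List Int) :=
  let m : Int := PySem.List.len cycles_3
  let incident : PySem.Dict Int (List Int) :=
    (PySem.List.enumerate cycles_3 0).foldl (fun d p =>
      (PySem.List.dedup p.2).foldl (fun d v => d.modify v [] (· ++ [p.1])) d) PySem.Dict.empty
  let adj : List (List Int) := (PySem.List.pyRange 0 m 1).map (fun _ => PySem.List.pyRepeat [0] m)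
  incident.values.foldl (fun adj bucket =>
    (PySem.List.pyRange 0 (PySem.List.len bucket) 1).foldl (fun adj a =>
      (PySem.List.pyRange (a + 1) (PySem.List.len bucket) 1).foldl (fun adj b =>
        pvSet2 adj (PySem.List.pyGetD bucket a 0) (PySem.List.pyGetD bucket b 0)) adj) adj) adj

-- ===== PRECONDITION & SPEC =====
def Spec_build_conflict_graph_3 (cycles_3 : List (List Int)) (out : List (List Int)) : Prop := out = build_conflict_graph_3_alt cycles_3
instance (cycles_3 : List (List Int)) (out : List (List Int)) : Decidable (Spec_build_conflict_graph_3 cycles_3 out) := by unfold Spec_build_conflict_graph_3; infer_instance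

-- ===== CLAIM (what is proved, stated in full; the proofs are below) =====
def Claim_equal_build_conflict_graph_3 : Prop := ∀ (cycles_3 : List (List Int)), Dom_build_conflict_graph_3 cycles_3 → Spec_build_conflict_graph_3 cycles_3 (build_conflict_graph_3 cycles_3)

-- ===== LEMMAS AND PROOFS =====

-- matrix entry and shape
def pvEnt (M : List (List Int)) (p q : Nat) : Int := (M.getD p []).getD q 0
def pvShape (m : Nat) (M : List (List Int)) : Prop := M.length = m ∧ ∀ r ∈ M, r.length = m
def pvPF (ps : List (Nat × Nat)) (M : List (List Int)) : List (List Int) :=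
  ps.foldl (fun M p => pvSet2 M ↑p.1 ↑p.2) M
def pvZ (m : Nat) : List (List Int) :=
  (PySem.List.pyRange 0 (m : Int) 1).map (fun _ => PySem.List.pyRepeat [0] (m : Int))

lemma pvSet1_cast (M : List (List Int)) (i j : Nat) :
    pvSet1 M ↑i ↑j = M.set i ((M.getD i []).set j 1) := by
  simp [pvSet1]

lemma pvShape_set1 {m : Nat} {M : List (List Int)} (h : pvShape m M) (i j : Nat)
    (hi : i < m) : pvShape m (pvSet1 M ↑i ↑j) := by
  obtain ⟨hl, hr⟩ := h
  rw [pvSet1_cast]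
  refine ⟨by simpa using hl, ?_⟩
  intro r hrm
  rcases List.mem_or_eq_of_mem_set hrm with h' | h'
  · exact hr r h'
  · subst h'
    rw [List.length_set]
    exact hr _ (by rw [List.getD_eq_getElem _ _ (by omega)]; exact List.getElem_mem _)

lemma pvEnt_set1 {m : Nat} {M : List (List Int)} (h : pvShape m M) (i j : Nat)
    (hi : i < m) (hj : j < m) (p q : Nat) :
    pvEnt (pvSet1 M ↑i ↑j) p q = if p = i ∧ q = j then 1 else pvEnt M p q := by
  obtain ⟨hl, hr⟩ := h
  have hrowlen : (M.getD i []).length = m := by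
    rw [List.getD_eq_getElem _ _ (by omega)]
    exact hr _ (List.getElem_mem _)
  rw [pvSet1_cast]
  simp only [pvEnt, List.getD_eq_getElem?_getD] at hrowlen ⊢
  by_cases hpi : p = i
  · subst hpi
    rw [List.getElem?_set_self (by omega)]
    simp only [Option.getD_some]
    by_cases hqj : q = j
    · subst hqj
      rw [List.getElem?_set_self (by omega)]
      simp
    · rw [List.getElem?_set_ne (by omega)]
      simp [hqj]
  · rw [List.getElem?_set_ne (by omega)]
    simp [hpi]

lemma pvShape_set2 {m : Nat} {M : List (List Int)} (h : pvShape m M) (i j : Nat)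
    (hi : i < m) (hj : j < m) : pvShape m (pvSet2 M ↑i ↑j) :=
  pvShape_set1 (pvShape_set1 h i j hi) j i hj

lemma pvEnt_set2 {m : Nat} {M : List (List Int)} (h : pvShape m M) (i j : Nat)
    (hi : i < m) (hj : j < m) (p q : Nat) :
    pvEnt (pvSet2 M ↑i ↑j) p q
      = if (p = i ∧ q = j) ∨ (p = j ∧ q = i) then 1 else pvEnt M p q := by
  unfold pvSet2
  rw [pvEnt_set1 (pvShape_set1 h i j hi) j i hj hi,
    pvEnt_set1 h i j hi hj]
  split_ifs with h1 h2 h3 h4 h5 <;> tauto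

lemma pvShape_pvPF {m : Nat} (ps : List (Nat × Nat)) {M : List (List Int)}
    (h : pvShape m M) (hps : ∀ p ∈ ps, p.1 < m ∧ p.2 < m) : pvShape m (pvPF ps M) := by
  induction ps generalizing M with
  | nil => exact h
  | cons hd tl ih =>
    have hhd := hps hd (by simp)
    exact ih (pvShape_set2 h hd.1 hd.2 hhd.1 hhd.2) (fun p hp => hps p (by simp [hp]))

lemma pvEnt_pvPF {m : Nat} (ps : List (Nat × Nat)) {M : List (List Int)}
    (h : pvShape m M) (hps : ∀ p ∈ ps, p.1 < m ∧ p.2 < m) (p q : Nat) :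
    pvEnt (pvPF ps M) p q = if (p, q) ∈ ps ∨ (q, p) ∈ ps then 1 else pvEnt M p q := by
  induction ps generalizing M with
  | nil => simp [pvPF]
  | cons hd tl ih =>
    have hhd := hps hd (by simp)
    have step : pvPF (hd :: tl) M = pvPF tl (pvSet2 M ↑hd.1 ↑hd.2) := rfl
    rw [step, ih (pvShape_set2 h hd.1 hd.2 hhd.1 hhd.2) (fun p hp => hps p (by simp [hp])),
      pvEnt_set2 h hd.1 hd.2 hhd.1 hhd.2]
    rcases hd with ⟨a, b⟩
    simp only [List.mem_cons, Prod.mk.injEq]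
    split_ifs <;> tauto

lemma pvZ_eq (m : Nat) : pvZ m = List.replicate m (List.replicate m 0) := by
  unfold pvZ
  rw [PySem.List.pyRepeat_singleton, List.map_const']
  simp [PySem.List.length_pyRange_one]

lemma pvShape_Z (m : Nat) : pvShape m (pvZ m) := by
  rw [pvZ_eq]
  exact ⟨by simp, fun r hr => by rw [List.eq_of_mem_replicate hr]; simp⟩

lemma pvPF_flatMap {α : Type} (l : List α) (g : α → List (Nat × Nat)) (M : List (List Int)) :
    l.foldl (fun M x => pvPF (g x) M) M = pvPF (l.flatMap g) M :=
  (List.foldl_flatMap ..).symm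

-- 'flatMap of an if-singleton is a filtered map' (specific shape of B's bucket lists)
lemma pvFlatMap_if {α β : Type} (l : List α) (p : α → Bool) (f : α → β) :
    l.flatMap (fun i => if p i then [f i] else []) = (l.filter p).map f := by
  induction l with
  | nil => rfl
  | cons hd tl ih => by_cases h : p hd <;> simp [h, ih]

lemma pvExt {m : Nat} {M M' : List (List Int)} (h : pvShape m M) (h' : pvShape m M')
    (he : ∀ p q, p < m → q < m → pvEnt M p q = pvEnt M' p q) : M = M' := by
  obtain ⟨hl, hr⟩ := h
  obtain ⟨hl', hr'⟩ := h'
  apply List.ext_getElem (by omega)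
  intro p hp hp'
  have hrow : M[p].length = m := hr _ (List.getElem_mem _)
  have hrow' : M'[p].length = m := hr' _ (List.getElem_mem _)
  apply List.ext_getElem (by omega)
  intro q hq hq'
  have := he p q (by omega) (by omega)
  unfold pvEnt at this
  have e1 : M.getD p [] = M[p] := List.getD_eq_getElem _ _ (by omega)
  have e2 : M'.getD p [] = M'[p] := List.getD_eq_getElem _ _ (by omega)
  rw [e1, e2, List.getD_eq_getElem _ _ (by omega), List.getD_eq_getElem _ _ (by omega)] at this
  exact this

-- A's condition and its pair list
abbrev pvCondA (cycles : List (List Int)) (i j : Nat) : Prop :=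
  PySem.Set.inter (PySem.Set.ofList (cycles.getD i [])) (PySem.Set.ofList (cycles.getD j [])) ≠ []

def pvPairsA (cycles : List (List Int)) : List (Nat × Nat) :=
  (List.range cycles.length).flatMap (fun i =>
    ((List.range (cycles.length - (i+1))).filter
        (fun k => decide (pvCondA cycles i (i+1+k)))).map (fun k => (i, i+1+k)))

lemma portA_eq (cycles : List (List Int)) :
    build_conflict_graph_3 cycles = pvPF (pvPairsA cycles) (pvZ cycles.length) := by
  simp only [build_conflict_graph_3, PySem.List.len_eq]
  rw [pvPairsA, ← pvPF_flatMap, PySem.List.pyRange_one]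
  simp only [Int.sub_zero, Int.toNat_natCast, zero_add]
  rw [List.foldl_map]
  have hz : (List.map (fun _ => PySem.List.pyRepeat [0] (cycles.length : Int))
        (List.map (fun k : Nat => (k : Int)) (List.range cycles.length))) = pvZ cycles.length := by
    simp [pvZ_eq, List.map_const', PySem.List.pyRepeat_singleton, List.map_map, Function.comp_def]
  rw [hz]
  apply PySem.List.foldl_congr_mem
  intro acc i _
  have h1 : ((i:Int) + 1) = ((i+1 : Nat) : Int) := by push_cast; ring
  rw [h1, PySem.List.pyRange_one, Int.toNat_sub, List.foldl_map]
  have h2 : ∀ k : Nat, ((i+1 : Nat) : Int) + (k : Int) = ((i+1+k : Nat) : Int) := by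
    intro k; push_cast; ring
  simp only [h2, PySem.List.pyGetD_natCast]
  rw [PySem.List.foldl_ite_eq_foldl_filter]
  show _ = (((List.range (cycles.length - (i+1))).filter
      (fun k => decide (pvCondA cycles i (i+1+k)))).map (fun k => (i, i+1+k))).foldl
      (fun M p => pvSet2 M ↑p.1 ↑p.2) acc
  rw [List.foldl_map]

lemma pvCondA_iff (cycles : List (List Int)) (i j : Nat) :
    pvCondA cycles i j ↔ ∃ v, v ∈ cycles.getD i [] ∧ v ∈ cycles.getD j [] := by
  unfold pvCondA
  rw [Ne, List.eq_nil_iff_forall_not_mem]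
  push Not
  simp [PySem.Set.mem_inter, PySem.Set.mem_ofList]

lemma pvMem_pairsA (cycles : List (List Int)) (p q : Nat) :
    (p, q) ∈ pvPairsA cycles ↔ p < q ∧ q < cycles.length ∧ pvCondA cycles p q := by
  unfold pvPairsA
  simp only [List.mem_flatMap, List.mem_map, List.mem_filter, List.mem_range, Prod.mk.injEq,
    decide_eq_true_eq]
  constructor
  · rintro ⟨i, hi, k, ⟨hk, hc⟩, rfl, rfl⟩
    exact ⟨by omega, by omega, hc⟩
  · rintro ⟨hpq, hq, hc⟩
    exact ⟨p, by omega, ⟨q - p - 1, ⟨by omega, by rwa [show p+1+(q-p-1) = q by omega]⟩,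
      rfl, by omega⟩⟩

-- B's inverted index and its pair list
def pvBucketN (cycles : List (List Int)) (v : Int) : List Nat :=
  (List.range cycles.length).filter (fun i => decide (v ∈ cycles.getD i []))

def pvPairs2 (L : List Nat) : List (Nat × Nat) :=
  (List.range L.length).flatMap (fun a =>
    (List.range (L.length - (a+1))).map (fun k => (L.getD a 0, L.getD (a+1+k) 0)))

def pvVIP (cycles : List (List Int)) : List (Int × Int) :=
  (PySem.List.enumerate cycles 0).flatMap (fun pr =>
    (PySem.List.dedup pr.2).map (fun v => (v, pr.1)))

def pvInc (cycles : List (List Int)) : PySem.Dict Int (List Int) :=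
  (pvVIP cycles).foldl (fun d pr => d.modify pr.1 [] (· ++ [pr.2])) PySem.Dict.empty

def pvKeys (cycles : List (List Int)) : List Int := (pvInc cycles).keys

def pvPairsB (cycles : List (List Int)) : List (Nat × Nat) :=
  (pvKeys cycles).flatMap (fun v => pvPairs2 (pvBucketN cycles v))

lemma pvVIP_eq (cycles : List (List Int)) :
    pvVIP cycles = (List.range cycles.length).flatMap (fun i =>
      (PySem.List.dedup (cycles.getD i [])).map (fun v => (v, (i : Int)))) := by
  unfold pvVIP
  rw [PySem.List.enumerate_eq_map_pyRange cycles ([] : List Int), PySem.List.pyRange_one]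
  simp only [PySem.List.len_eq, Int.sub_zero, Int.toNat_natCast, List.map_map,
    List.flatMap_map, Function.comp_def, zero_add, PySem.List.pyGetD_natCast]

lemma pvBucket_eq (cycles : List (List Int)) (v : Int) :
    (pvInc cycles).getD v [] = (pvBucketN cycles v).map (fun i : Nat => (i : Int)) := by
  unfold pvInc
  rw [PySem.Dict.getD_foldl_modify_append, PySem.Dict.getD_empty, pvVIP_eq, List.nil_append,
    List.filter_flatMap, List.map_flatMap]
  have hblock : forall i : Nat,
      (((PySem.List.dedup (cycles.getD i [])).map (fun v' => (v', (i:Int)))).filter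
          (fun pr => pr.1 == v)).map (fun pr => pr.2)
      = if decide (v ∈ cycles.getD i []) then [(i : Int)] else [] := by
    intro i
    rw [List.filter_map, List.map_map]
    have hcomp : ((fun pr : Int × Int => pr.1 == v) ∘ (fun v' => (v', (i:Int))))
        = (fun v' => v' == v) := rfl
    rw [hcomp, List.filter_beq]
    have hnd : (PySem.List.dedup (cycles.getD i [])).Nodup := PySem.List.nodup_dedup _
    by_cases hv : v ∈ cycles.getD i []
    · have hvd : v ∈ PySem.List.dedup (cycles.getD i []) := (PySem.List.mem_dedup _ _).mpr hv
      rw [List.count_eq_one_of_mem hnd hvd, decide_eq_true hv]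
      simp
    · have hvd : v ∉ PySem.List.dedup (cycles.getD i []) :=
        fun hc => hv ((PySem.List.mem_dedup _ _).mp hc)
      rw [List.count_eq_zero_of_not_mem hvd, decide_eq_false hv]
      simp
  rw [List.flatMap_congr (fun i _ => hblock i)]
  exact pvFlatMap_if _ _ _

lemma pvKeys_nodup (cycles : List (List Int)) : (pvKeys cycles).Nodup := by
  unfold pvKeys pvInc
  exact PySem.Dict.nodup_keys_foldl_modify_key (pvVIP cycles) (fun pr : Int × Int => pr.1) []
    (fun _ pr => (· ++ [pr.2])) PySem.Dict.empty PySem.Dict.nodup_keys_empty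

lemma pvMem_keys (cycles : List (List Int)) (v : Int) :
    v ∈ pvKeys cycles ↔ ∃ i, i < cycles.length ∧ v ∈ cycles.getD i [] := by
  unfold pvKeys pvInc
  have h := PySem.Dict.keys_foldl_modify_key (κ := Int) (ν := List Int) (pvVIP cycles)
    (fun pr : Int × Int => pr.1) [] (fun _ pr => (· ++ [pr.2])) PySem.Dict.empty
  rw [h, PySem.Dict.keys_empty]
  rw [show (PySem.Set.update ([] : PySem.Set Int) ((pvVIP cycles).map (fun pr : Int × Int => pr.1)))
      = PySem.Set.ofList ((pvVIP cycles).map (fun pr : Int × Int => pr.1)) from rfl]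
  rw [PySem.Set.mem_ofList]
  rw [pvVIP_eq]
  simp only [List.mem_map, List.mem_flatMap, List.mem_range]
  constructor
  · rintro ⟨pr, ⟨i, hi, w, hw, rfl⟩, rfl⟩
    exact ⟨i, hi, (PySem.List.mem_dedup _ _).mp hw⟩
  · rintro ⟨i, hi, hv⟩
    exact ⟨(v, (i:Int)), ⟨i, hi, v, (PySem.List.mem_dedup _ _).mpr hv, rfl⟩, rfl⟩

lemma pvMem_bucketN (cycles : List (List Int)) (v : Int) (i : Nat) :
    i ∈ pvBucketN cycles v ↔ i < cycles.length ∧ v ∈ cycles.getD i [] := by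
  unfold pvBucketN
  simp [List.mem_filter, List.mem_range]

lemma pvBucketN_pairwise (cycles : List (List Int)) (v : Int) :
    (pvBucketN cycles v).Pairwise (· < ·) :=
  List.Pairwise.filter _ List.pairwise_lt_range

lemma pvMem_pairs2 (L : List Nat) (hL : L.Pairwise (· < ·)) (p q : Nat) :
    (p, q) ∈ pvPairs2 L ↔ p ∈ L ∧ q ∈ L ∧ p < q := by
  unfold pvPairs2
  simp only [List.mem_flatMap, List.mem_map, List.mem_range, Prod.mk.injEq]
  rw [List.pairwise_iff_getElem] at hL
  constructor
  · rintro ⟨a, ha, k, hk, h1, h2⟩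
    have hb : a + 1 + k < L.length := by omega
    have e1 : L.getD a 0 = L[a] := List.getD_eq_getElem _ _ (by omega)
    have e2 : L.getD (a+1+k) 0 = L[a+1+k] := List.getD_eq_getElem _ _ hb
    subst h1; subst h2
    rw [e1, e2]
    exact ⟨List.getElem_mem _, List.getElem_mem _, hL a (a+1+k) ha hb (by omega)⟩
  · rintro ⟨hp, hq, hpq⟩
    obtain ⟨a, ha, rfl⟩ := List.mem_iff_getElem.mp hp
    obtain ⟨b, hb, rfl⟩ := List.mem_iff_getElem.mp hq
    have hab : a < b := by
      rcases Nat.lt_trichotomy a b with h | h | h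
      · exact h
      · subst h; exact absurd hpq (lt_irrefl _)
      · exact absurd (hL b a hb ha h) (Nat.lt_asymm hpq)
    refine ⟨a, ?_, b - a - 1, ?_, ?_, ?_⟩
    · exact ha
    · omega
    · exact List.getD_eq_getElem _ _ ha
    · rw [show a+1+(b-a-1) = b from by omega]
      exact List.getD_eq_getElem _ _ hb

set_option maxHeartbeats 1000000 in
lemma portB_eq (cycles : List (List Int)) :
    build_conflict_graph_3_alt cycles = pvPF (pvPairsB cycles) (pvZ cycles.length) := by
  simp only [build_conflict_graph_3_alt, PySem.List.len_eq]
  have hinc : (PySem.List.enumerate cycles 0).foldl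
      (fun d p => (PySem.List.dedup p.2).foldl (fun d v => d.modify v [] (· ++ [p.1])) d)
      PySem.Dict.empty = pvInc cycles := by
    rw [pvInc, pvVIP, List.foldl_flatMap]
    apply PySem.List.foldl_congr_mem
    intro acc pr _
    rw [List.foldl_map]
  rw [hinc]
  have hvals : (pvInc cycles).values
      = (pvKeys cycles).map (fun v => (pvBucketN cycles v).map (fun i : Nat => (i : Int))) := by
    rw [PySem.Dict.values_eq_map_keys _ (pvKeys_nodup cycles) ([] : List Int)]
    exact List.map_congr_left (fun v _ => pvBucket_eq cycles v)
  rw [hvals]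
  have hz : (List.map (fun _ => PySem.List.pyRepeat [0] (cycles.length : Int))
        (PySem.List.pyRange 0 (cycles.length : Int) 1)) = pvZ cycles.length := by
    rw [PySem.List.pyRange_one]
    simp [pvZ_eq, List.map_const', PySem.List.pyRepeat_singleton, List.map_map, Function.comp_def]
  rw [hz, pvPairsB, ← pvPF_flatMap, List.foldl_map]
  apply PySem.List.foldl_congr_mem
  intro acc v _
  -- one bucket
  rw [pvPairs2, ← pvPF_flatMap]
  simp only [List.length_map]
  rw [PySem.List.pyRange_one]
  simp only [Int.sub_zero, Int.toNat_natCast, zero_add]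
  rw [List.foldl_map]
  apply PySem.List.foldl_congr_mem
  intro acc2 a ha
  have h1 : ((a:Int) + 1) = ((a+1 : Nat) : Int) := by push_cast; ring
  rw [h1, PySem.List.pyRange_one, Int.toNat_sub, List.foldl_map]
  show _ = ((List.range ((pvBucketN cycles v).length - (a+1))).map
      (fun k => ((pvBucketN cycles v).getD a 0, (pvBucketN cycles v).getD (a+1+k) 0))).foldl
      (fun M p => pvSet2 M ↑p.1 ↑p.2) acc2
  rw [List.foldl_map]
  apply PySem.List.foldl_congr_mem
  intro acc3 k hk
  rw [List.mem_range] at ha hk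
  have h2 : ((a+1 : Nat) : Int) + (k : Int) = ((a+1+k : Nat) : Int) := by push_cast; ring
  rw [h2]
  have hg : ∀ (n : Nat), n < (pvBucketN cycles v).length →
      PySem.List.pyGetD ((pvBucketN cycles v).map (fun i : Nat => (i : Int))) (n : Int) 0
        = (((pvBucketN cycles v).getD n 0 : Nat) : Int) := by
    intro n hn
    rw [PySem.List.pyGetD_natCast, List.getD_eq_getElem _ _ (by simpa using hn),
      List.getD_eq_getElem _ _ hn]
    simp
  rw [hg a ha, hg (a+1+k) (by omega)]

lemma pvMem_pairsB (cycles : List (List Int)) (p q : Nat) :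
    (p, q) ∈ pvPairsB cycles ↔ p < q ∧ p < cycles.length ∧ q < cycles.length ∧
      ∃ w, w ∈ cycles.getD p [] ∧ w ∈ cycles.getD q [] := by
  unfold pvPairsB
  simp only [List.mem_flatMap]
  constructor
  · rintro ⟨v, hv, hmem⟩
    rw [pvMem_pairs2 _ (pvBucketN_pairwise cycles v)] at hmem
    obtain ⟨hp, hq, hpq⟩ := hmem
    rw [pvMem_bucketN] at hp hq
    exact ⟨hpq, hp.1, hq.1, v, hp.2, hq.2⟩
  · rintro ⟨hpq, hp, hq, w, hwp, hwq⟩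
    refine ⟨w, (pvMem_keys cycles w).mpr ⟨p, hp, hwp⟩, ?_⟩
    rw [pvMem_pairs2 _ (pvBucketN_pairwise cycles w)]
    exact ⟨(pvMem_bucketN cycles w p).mpr ⟨hp, hwp⟩, (pvMem_bucketN cycles w q).mpr ⟨hq, hwq⟩, hpq⟩

-- ===== VERDICT (by name: the statement is the Claim_ definition above) =====
theorem build_conflict_graph_3_spec : Claim_equal_build_conflict_graph_3 := by
  intro cycles _
  unfold Spec_build_conflict_graph_3
  rw [portA_eq, portB_eq]
  have hbA : ∀ pr ∈ pvPairsA cycles, pr.1 < cycles.length ∧ pr.2 < cycles.length := by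
    rintro ⟨p, q⟩ h
    have h' := (pvMem_pairsA cycles p q).mp h
    exact ⟨by omega, by omega⟩
  have hbB : ∀ pr ∈ pvPairsB cycles, pr.1 < cycles.length ∧ pr.2 < cycles.length := by
    rintro ⟨p, q⟩ h
    have h' := (pvMem_pairsB cycles p q).mp h
    exact ⟨h'.2.1, h'.2.2.1⟩
  apply pvExt (pvShape_pvPF _ (pvShape_Z cycles.length) hbA)
    (pvShape_pvPF _ (pvShape_Z cycles.length) hbB)
  intro p q hp hq
  rw [pvEnt_pvPF _ (pvShape_Z cycles.length) hbA, pvEnt_pvPF _ (pvShape_Z cycles.length) hbB]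
  have hiff : ((p, q) ∈ pvPairsA cycles ∨ (q, p) ∈ pvPairsA cycles)
      ↔ ((p, q) ∈ pvPairsB cycles ∨ (q, p) ∈ pvPairsB cycles) := by
    rw [pvMem_pairsA, pvMem_pairsA, pvMem_pairsB, pvMem_pairsB, pvCondA_iff, pvCondA_iff]
    constructor
    · rintro (⟨h1, h2, v, hv1, hv2⟩ | ⟨h1, h2, v, hv1, hv2⟩)
      · exact Or.inl ⟨h1, by omega, h2, v, hv1, hv2⟩
      · exact Or.inr ⟨h1, by omega, h2, v, hv1, hv2⟩
    · rintro (⟨h1, h2, h3, v, hv1, hv2⟩ | ⟨h1, h2, h3, v, hv1, hv2⟩)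
      · exact Or.inl ⟨h1, h3, v, hv1, hv2⟩
      · exact Or.inr ⟨h1, h3, v, hv1, hv2⟩
  rw [if_congr hiff rfl rfl]
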